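-- pv_equiv track=rewrite | github.com/d-uni/semester-5 | ML_CMC/assignment-1/functions.py | sum_non_neg_diag
-- ===== SOURCE A (Python) =====
-- def sum_non_neg_diag(x):
--     sum = 0
--     f = 0
--     for i in range(len(x)):
--         for j in range(len(x[i])):
--             if(i == j and x[i][j] >= 0 ):
--                 f = 1
--                 sum += x[i][j]
--     return sum if f else -1
-- ===== SOURCE B (Python) =====
-- def sum_non_neg_diag(x):
--     vals = [row[i] for i, row in enumerate(x) if i < len(row) and row[i] >= 0]
--     return sum(vals) if vals else -1
-- ===== Notes on version B (the rewrite author's own statement) =====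
-- stated objective: alternative
-- what changed: B collects the non-negative diagonal entries in one comprehension over enumerate (touching only cell i of row i, guarding ragged short rows) and then sums them or returns -1 if none, instead of A's nested scan over every cell with a running sum and flag.
import Mathlib
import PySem

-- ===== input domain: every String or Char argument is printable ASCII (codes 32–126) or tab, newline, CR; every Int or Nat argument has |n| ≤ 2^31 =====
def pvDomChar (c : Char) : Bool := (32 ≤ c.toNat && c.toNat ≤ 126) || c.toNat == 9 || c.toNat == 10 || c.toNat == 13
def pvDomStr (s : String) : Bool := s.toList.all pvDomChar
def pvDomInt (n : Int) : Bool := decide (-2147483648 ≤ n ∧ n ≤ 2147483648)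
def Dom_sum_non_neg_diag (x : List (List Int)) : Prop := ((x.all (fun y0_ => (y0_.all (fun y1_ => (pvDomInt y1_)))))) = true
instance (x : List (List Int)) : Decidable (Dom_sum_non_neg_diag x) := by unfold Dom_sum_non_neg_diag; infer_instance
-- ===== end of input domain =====

-- B collects the non-negative diagonal entries directly (one pass over enumerate) instead of A's nested scan with a running sum and flag.

-- ===== PORT A =====
-- literal transliteration of A: nested loops over range(len(x)) / range(len(x[i])),
-- state (sum, f); indices produced by range are always in bounds, so getD is exact.
def sum_non_neg_diag (x : List (List Int)) : Int :=
  let r := (List.range x.length).foldl (fun (st : Int × Int) i =>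
    let row := x.getD i []
    (List.range row.length).foldl (fun (st : Int × Int) j =>
      if i = j ∧ row.getD j 0 ≥ 0 then (st.1 + row.getD j 0, 1) else st) st) (0, 0)
  if r.2 ≠ 0 then r.1 else -1

-- ===== PORT B =====
-- transliteration of Source B's comprehension over enumerate(x)
def sndVals : Nat → List (List Int) → List Int
  | _, [] => []
  | i, row :: rest =>
    (if i < row.length ∧ row.getD i 0 ≥ 0 then [row.getD i 0] else []) ++ sndVals (i + 1) rest

def sum_non_neg_diag_alt (x : List (List Int)) : Int :=
  let vals := sndVals 0 x
  if vals.isEmpty then -1 else vals.sum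

-- ===== PRECONDITION & SPEC =====
def Spec_sum_non_neg_diag (x : List (List Int)) (out : Int) : Prop := out = sum_non_neg_diag_alt x
instance (x : List (List Int)) (out : Int) : Decidable (Spec_sum_non_neg_diag x out) := by unfold Spec_sum_non_neg_diag; infer_instance

-- ===== CLAIM (what is proved, stated in full; the proofs are below) =====
def Claim_equal_sum_non_neg_diag : Prop := ∀ (x : List (List Int)), Dom_sum_non_neg_diag x → Spec_sum_non_neg_diag x (sum_non_neg_diag x)

-- ===== LEMMAS AND PROOFS =====

-- A's inner loop over j only fires at j = i
theorem inner_fold (row : List Int) (i : Nat) (n : Nat) (st : Int × Int) :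
    (List.range n).foldl (fun (st : Int × Int) j =>
      if i = j ∧ row.getD j 0 ≥ 0 then (st.1 + row.getD j 0, 1) else st) st
    = if i < n ∧ row.getD i 0 ≥ 0 then (st.1 + row.getD i 0, 1) else st := by
  induction n with
  | zero => simp
  | succ n ih =>
    rw [List.range_succ, List.foldl_append, ih]
    simp only [List.foldl_cons, List.foldl_nil]
    by_cases hn : i = n
    · subst hn
      by_cases hv : row.getD i 0 ≥ 0
      · rw [if_pos ⟨rfl, hv⟩, if_neg (fun h => absurd h.1 (Nat.lt_irrefl i)),
          if_pos ⟨Nat.lt_succ_self i, hv⟩]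
      · rw [if_neg (fun h => hv h.2), if_neg (fun h => hv h.2), if_neg (fun h => hv h.2)]
    · rw [if_neg (fun h => hn h.1)]
      by_cases hlt : i < n
      · have h2 : i < n + 1 := Nat.lt_succ_of_lt hlt
        by_cases hv : row.getD i 0 ≥ 0
        · rw [if_pos ⟨hlt, hv⟩, if_pos ⟨h2, hv⟩]
        · rw [if_neg (fun h => hv h.2), if_neg (fun h => hv h.2)]
      · have h2 : ¬ i < n + 1 := by omega
        rw [if_neg (fun h => hlt h.1), if_neg (fun h => h2 h.1)]

-- structural form of A's outer loop
def foldA : Nat → List (List Int) → Int × Int → Int × Int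
  | _, [], st => st
  | i, row :: rest, st =>
    foldA (i + 1) rest (if i < row.length ∧ row.getD i 0 ≥ 0 then (st.1 + row.getD i 0, 1) else st)

theorem outer_fold (x : List (List Int)) (off : Nat) (st : Int × Int) :
    (List.range x.length).foldl (fun (st : Int × Int) i =>
      if i + off < (x.getD i []).length ∧ (x.getD i []).getD (i + off) 0 ≥ 0
      then (st.1 + (x.getD i []).getD (i + off) 0, 1) else st) st
    = foldA off x st := by
  induction x generalizing off st with
  | nil => simp [foldA]
  | cons row rest ih =>
    rw [List.length_cons, List.range_succ_eq_map]
    simp only [List.foldl_cons, List.foldl_map, List.getD_cons_zero, List.getD_cons_succ,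
      Nat.zero_add]
    rw [show (fun (st : Int × Int) (i : Nat) =>
        if i + 1 + off < (rest.getD i []).length ∧ (rest.getD i []).getD (i + 1 + off) 0 ≥ 0
        then (st.1 + (rest.getD i []).getD (i + 1 + off) 0, 1) else st)
      = (fun (st : Int × Int) (i : Nat) =>
        if i + (off + 1) < (rest.getD i []).length ∧ (rest.getD i []).getD (i + (off + 1)) 0 ≥ 0
        then (st.1 + (rest.getD i []).getD (i + (off + 1)) 0, 1) else st) from by
        funext st i; ring_nf]
    rw [ih (off + 1)]
    rfl

theorem foldA_vals (x : List (List Int)) (off : Nat) (st : Int × Int) :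
    foldA off x st = (st.1 + (sndVals off x).sum, if sndVals off x = [] then st.2 else 1) := by
  induction x generalizing off st with
  | nil => simp [foldA, sndVals]
  | cons row rest ih =>
    by_cases h : off < row.length ∧ row.getD off 0 ≥ 0
    · simp only [foldA, sndVals, if_pos h, ih]
      simp [add_assoc]
    · simp only [foldA, sndVals, if_neg h, ih, List.nil_append]

-- ===== VERDICT (by name: the statement is the Claim_ definition above) =====
theorem sum_non_neg_diag_spec : Claim_equal_sum_non_neg_diag := by
  intro x _
  unfold Spec_sum_non_neg_diag sum_non_neg_diag sum_non_neg_diag_alt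
  have hbody : (fun (st : Int × Int) i =>
      let row := x.getD i []
      (List.range row.length).foldl (fun (st : Int × Int) j =>
        if i = j ∧ row.getD j 0 ≥ 0 then (st.1 + row.getD j 0, 1) else st) st)
      = (fun (st : Int × Int) i =>
      if i + 0 < (x.getD i []).length ∧ (x.getD i []).getD (i + 0) 0 ≥ 0
      then (st.1 + (x.getD i []).getD (i + 0) 0, 1) else st) := by
    funext st i
    simp only [Nat.add_zero]
    exact inner_fold (x.getD i []) i (x.getD i []).length st
  rw [hbody, outer_fold x 0 (0, 0), foldA_vals]
  by_cases h : sndVals 0 x = [] <;> simp [h]
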